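-- pv_equiv track=rewrite | github.com/bethsg/Starlizard-Questions | Starlizard-Questions.py | getMaximumOutfits
-- ===== SOURCE A (Python) =====
-- def getMaximumOutfits(outfits, money):
--     last_outfit = len(outfits) - 1
--     max_outfits = 0
--     for i in range(0, len(outfits)):
--         remaining_money = money
--         j = i
--         while j <= last_outfit and remaining_money >= outfits[j]:
--             remaining_money -= outfits[j]
--             j += 1
--         if (j - i) > max_outfits:
--             max_outfits = j - i
--     return max_outfits
-- ===== SOURCE B (Python) =====
-- # Binary-lifting over prefix-sum block maxima: for each start, the greedy stop
-- # index is found by doubling jumps instead of a step-by-step scan.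
-- def getMaximumOutfits(outfits, money):
--     n = len(outfits)
--     P = [0]
--     for x in outfits:
--         P.append(P[-1] + x)
--     # levels[k][s] = max(P[s+1 .. s+2**k]), for s + 2**k <= n
--     levels = [P[1:]]
--     size = 1
--     while 2 * size <= n:
--         prev = levels[-1]
--         levels.append([max(a, b) for a, b in zip(prev, prev[size:])])
--         size *= 2
--     best = 0
--     for i in range(n):
--         bound = money + P[i]
--         j = i
--         for k in range(len(levels) - 1, -1, -1):
--             step = 1 << k
--             if j + step <= n and levels[k][j] <= bound:
--                 j += step
--         if j - i > best:
--             best = j - i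
--     return best
-- ===== Notes on version B (the rewrite author's own statement) =====
-- stated objective: alternative
-- what changed: Replaces the per-start linear rescan with prefix sums plus a sparse table of block maxima and binary-lifting jumps, so each start's greedy stop index is found by O(log n) doubling jumps instead of a step-by-step scan; better worst case (O(n log n) vs O(n^2)) but a larger constant, so not measurably faster on the benchmark inputs.
import Mathlib
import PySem

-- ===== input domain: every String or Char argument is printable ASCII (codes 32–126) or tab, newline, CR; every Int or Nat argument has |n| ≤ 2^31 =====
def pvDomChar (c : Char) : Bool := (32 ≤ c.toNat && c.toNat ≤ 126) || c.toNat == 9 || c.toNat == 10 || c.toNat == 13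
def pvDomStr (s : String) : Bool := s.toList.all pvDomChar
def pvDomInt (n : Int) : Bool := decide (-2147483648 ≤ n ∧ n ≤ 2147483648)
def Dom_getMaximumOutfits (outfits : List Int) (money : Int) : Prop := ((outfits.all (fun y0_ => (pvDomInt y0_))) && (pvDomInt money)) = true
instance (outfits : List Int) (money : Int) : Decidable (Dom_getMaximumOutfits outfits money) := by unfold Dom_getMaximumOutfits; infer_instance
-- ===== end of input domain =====

-- B replaces A's per-start linear rescan by prefix sums + a sparse table of block
-- maxima with binary-lifting jumps (objective: alternative algorithm).

-- ===== PORT A =====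
-- the inner 'while j <= last_outfit and remaining_money >= outfits[j]' loop;
-- fuel = len(outfits)+1 always suffices (j increases, bounded by last_outfit+1)
def pvWhileA (outfits : List Int) (lastOutfit : Int) : Nat → Int → Int → Int
  | 0, _, j => j
  | fuel+1, remaining, j =>
    if j ≤ lastOutfit ∧ PySem.List.pyGetD outfits j 0 ≤ remaining then
      pvWhileA outfits lastOutfit fuel (remaining - PySem.List.pyGetD outfits j 0) (j + 1)
    else j

def getMaximumOutfits (outfits : List Int) (money : Int) : Int :=
  let lastOutfit := PySem.List.len outfits - 1
  (PySem.List.pyRange 0 (PySem.List.len outfits) 1).foldl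
    (fun maxOutfits i =>
      let j := pvWhileA outfits lastOutfit (outfits.length + 1) money i
      if maxOutfits < j - i then j - i else maxOutfits) 0

-- ===== PORT B =====
-- the 'while 2*size <= n' table-building loop of Source B; fuel = n+1 suffices
-- (size doubles each round); the fuel-0 branch returns what the loop exit returns
def pvBuildLevels (n : Nat) : Nat → Nat → List Int → List (List Int)
  | 0, _, prev => [prev]
  | fuel+1, size, prev =>
    if 2 * size ≤ n then
      prev :: pvBuildLevels n fuel (2 * size) (List.zipWith max prev (prev.drop size))
    else [prev]

def getMaximumOutfits_alt (outfits : List Int) (money : Int) : Int :=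
  let n := outfits.length
  let P := outfits.foldl (fun P x => P ++ [PySem.List.pyGetD P (-1) 0 + x]) [0]
  let levels := pvBuildLevels n (n+1) 1 (PySem.List.slice P (some 1) none)
  (PySem.List.pyRange 0 (PySem.List.len outfits) 1).foldl
    (fun best i =>
      let bound := money + PySem.List.pyGetD P i 0
      let j := (PySem.List.pyRange (PySem.List.len levels - 1) (-1) (-1)).foldl
        (fun j k =>
          let step : Int := (1 : Int) <<< k.toNat
          if j + step ≤ (n : Int) ∧
             PySem.List.pyGetD (PySem.List.pyGetD levels k []) j 0 ≤ bound then
            j + step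
          else j) i
      if best < j - i then j - i else best) 0

-- ===== PRECONDITION & SPEC =====
def Spec_getMaximumOutfits (outfits : List Int) (money : Int) (out : Int) : Prop := out = getMaximumOutfits_alt outfits money
instance (outfits : List Int) (money : Int) (out : Int) : Decidable (Spec_getMaximumOutfits outfits money out) := by unfold Spec_getMaximumOutfits; infer_instance

-- ===== CLAIM (what is proved, stated in full; the proofs are below) =====
def Claim_equal_getMaximumOutfits : Prop := ∀ (outfits : List Int) (money : Int), Dom_getMaximumOutfits outfits money → Spec_getMaximumOutfits outfits money (getMaximumOutfits outfits money)

-- ===== LEMMAS AND PROOFS =====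

-- prefix sum of the first t elements
def pvPS (l : List Int) (t : Nat) : Int := (l.take t).sum

-- running sums starting from c (models the list P[1:], i.e. P without its leading 0)
def pvSums (c : Int) : List Int → List Int
  | [] => []
  | x :: xs => (c + x) :: pvSums (c + x) xs

-- length of A's greedy affordable run
def pvGlen (b : Int) : List Int → Nat
  | [] => 0
  | x :: xs => if x ≤ b then pvGlen (b - x) xs + 1 else 0

-- "v is the max of pvPS l t over s < t ≤ s + sz", stated as a bound-characterisation
def pvPred (l : List Int) (v : Int) (s sz : Nat) : Prop :=
  ∀ c : Int, v ≤ c ↔ ∀ t : Nat, s < t → t ≤ s + sz → pvPS l t ≤ c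

-- proof-side view of the countdown fold
def pvRecD (F : Int → Nat → Int) : Nat → Int → Int
  | 0, j => j
  | k+1, j => pvRecD F k (F j k)

lemma pvSums_length (c : Int) (l : List Int) : (pvSums c l).length = l.length := by
  induction l generalizing c with
  | nil => rfl
  | cons x xs ih => simp [pvSums, ih]

lemma pvSums_getD (l : List Int) : ∀ (c : Int) (t : Nat), t < l.length →
    (pvSums c l).getD t 0 = c + pvPS l (t + 1) := by
  induction l with
  | nil => intro c t h; simp at h
  | cons x xs ih =>
    intro c t h
    cases t with
    | zero => simp [pvSums, pvPS]
    | succ t =>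
      simp only [pvSums, List.getD_cons_succ]
      rw [ih (c + x) t (by simpa using h)]
      simp [pvPS]
      ring

lemma pvFoldP (l : List Int) : ∀ (acc : List Int) (c : Int),
    l.foldl (fun P x => P ++ [PySem.List.pyGetD P (-1) 0 + x]) (acc ++ [c]) =
      acc ++ c :: pvSums c l := by
  induction l with
  | nil => intro acc c; simp [pvSums]
  | cons x xs ih =>
    intro acc c
    simp only [List.foldl_cons, PySem.List.pyGetD_neg_one_append_singleton]
    have : (acc ++ [c]) ++ [c + x] = (acc ++ [c]) ++ [c + x] := rfl
    rw [show acc ++ [c] ++ [c + x] = (acc ++ [c]) ++ [c + x] from rfl, ih (acc ++ [c]) (c + x)]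
    simp [pvSums]

lemma pvP_eq (l : List Int) :
    l.foldl (fun P x => P ++ [PySem.List.pyGetD P (-1) 0 + x]) [0] = 0 :: pvSums 0 l := by
  have := pvFoldP l [] 0
  simpa using this

lemma pvP_getD (l : List Int) (t : Nat) (h : t ≤ l.length) :
    (0 :: pvSums 0 l).getD t 0 = pvPS l t := by
  cases t with
  | zero => simp [pvPS]
  | succ t => simpa using pvSums_getD l 0 t (by omega)

lemma pvPS_drop (l : List Int) (i s : Nat) :
    pvPS (l.drop i) s = pvPS l (i + s) - pvPS l i := by
  simp [pvPS, List.take_add, List.sum_append]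

lemma pvGlen_le_length (b : Int) (l : List Int) : pvGlen b l ≤ l.length := by
  induction l generalizing b with
  | nil => simp [pvGlen]
  | cons x xs ih =>
    simp only [pvGlen]
    split
    · simpa using ih (b - x)
    · simp

lemma pvGlen_prefix_le (b : Int) (l : List Int) : ∀ s : Nat, 1 ≤ s → s ≤ pvGlen b l →
    (l.take s).sum ≤ b := by
  induction l generalizing b with
  | nil => intro s h1 h2; simp [pvGlen] at h2; omega
  | cons x xs ih =>
    intro s h1 h2
    simp only [pvGlen] at h2
    by_cases hx : x ≤ b
    · simp only [if_pos hx] at h2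
      cases s with
      | zero => omega
      | succ s =>
        simp only [List.take_succ_cons, List.sum_cons]
        cases Nat.eq_zero_or_pos s with
        | inl h0 => subst h0; simpa using hx
        | inr hs =>
          have := ih (b - x) s hs (by omega)
          omega
    · simp [if_neg hx] at h2; omega

lemma pvGlen_stop (b : Int) (l : List Int) : pvGlen b l < l.length →
    b < (l.take (pvGlen b l + 1)).sum := by
  induction l generalizing b with
  | nil => intro h; simp [pvGlen] at h
  | cons x xs ih =>
    intro h
    simp only [pvGlen] at h ⊢
    by_cases hx : x ≤ b
    · simp only [if_pos hx] at h ⊢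
      have := ih (b - x) (by simpa using h)
      simp only [List.take_succ_cons, List.sum_cons]
      omega
    · simp [if_neg hx] at h ⊢; omega

-- ----- A-side: the while loop computes i + greedy-run-length -----
lemma pvWhileA_eq (l : List Int) : ∀ (fuel : Nat) (i : Nat) (r : Int),
    i ≤ l.length → l.length - i < fuel →
    pvWhileA l ((l.length : Int) - 1) fuel r (i : Int) =
      (i : Int) + (pvGlen r (l.drop i) : Int) := by
  intro fuel
  induction fuel with
  | zero => intro i r h1 h2; omega
  | succ fuel ih =>
    intro i r h1 h2
    by_cases hi : i < l.length
    · have hdrop : l.drop i = l[i] :: l.drop (i + 1) := List.drop_eq_getElem_cons hi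
      simp only [pvWhileA]
      have hget : PySem.List.pyGetD l (i : Int) 0 = l[i] := by
        rw [PySem.List.pyGetD_natCast]
        exact List.getD_eq_getElem l 0 hi
      by_cases hx : l[i] ≤ r
      · rw [if_pos ⟨by omega, by rw [hget]; exact hx⟩, hget]
        have : (i : Int) + 1 = ((i + 1 : Nat) : Int) := by push_cast; ring
        rw [this, ih (i + 1) (r - l[i]) (by omega) (by omega)]
        rw [hdrop]
        simp only [pvGlen, if_pos hx]
        push_cast; ring
      · rw [if_neg (by rw [hget]; intro hc; exact hx hc.2)]
        rw [hdrop]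
        simp [pvGlen, if_neg hx]
    · have hieq : i = l.length := by omega
      simp only [pvWhileA]
      rw [if_neg (by rintro ⟨hc, -⟩; omega)]
      rw [hieq]
      simp [pvGlen]

-- ----- building the sparse table -----
lemma pvPred_max (l : List Int) (v1 v2 : Int) (s sz : Nat)
    (h1 : pvPred l v1 s sz) (h2 : pvPred l v2 (s + sz) sz) :
    pvPred l (max v1 v2) s (2 * sz) := by
  intro c
  constructor
  · intro h t ht1 ht2
    by_cases hts : t ≤ s + sz
    · exact ((h1 c).1 (le_trans (le_max_left _ _) h) t ht1 hts)
    · exact ((h2 c).1 (le_trans (le_max_right _ _) h) t (by omega) (by omega))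
  · intro h
    refine max_le ?_ ?_
    · exact (h1 c).2 (fun t ht1 ht2 => h t ht1 (by omega))
    · exact (h2 c).2 (fun t ht1 ht2 => h t (by omega) (by omega))

lemma pvBuild_ok (l : List Int) : ∀ (fuel k0 : Nat) (prev : List Int),
    l.length < 2 ^ k0 * 2 ^ fuel →
    prev.length + 2 ^ k0 = l.length + 1 →
    (∀ s : Nat, s + 2 ^ k0 ≤ l.length → pvPred l (prev.getD s 0) s (2 ^ k0)) →
    l.length < 2 ^ (k0 + (pvBuildLevels l.length fuel (2 ^ k0) prev).length) ∧
    (∀ d : Nat, d < (pvBuildLevels l.length fuel (2 ^ k0) prev).length →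
      ∀ s : Nat, s + 2 ^ (k0 + d) ≤ l.length →
        pvPred l (((pvBuildLevels l.length fuel (2 ^ k0) prev).getD d []).getD s 0) s (2 ^ (k0 + d))) := by
  intro fuel
  induction fuel with
  | zero =>
    intro k0 prev hfuel hlen hpred
    simp only [pvBuildLevels]
    refine ⟨?_, ?_⟩
    · have h1 : l.length < 2 ^ k0 := by simpa using hfuel
      have h2 : (2:Nat) ^ k0 ≤ 2 ^ (k0 + 1) := Nat.pow_le_pow_right (by omega) (by omega)
      simpa using lt_of_lt_of_le h1 h2
    · intro d hd s hs
      have hd0 : d = 0 := by simpa using hd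
      subst hd0
      simpa using hpred s (by simpa using hs)
  | succ fuel ih =>
    intro k0 prev hfuel hlen hpred
    by_cases hc : 2 * 2 ^ k0 ≤ l.length
    · have hsz : 2 * 2 ^ k0 = 2 ^ (k0 + 1) := by rw [pow_succ]; ring
      have hplen : prev.length = l.length + 1 - 2 ^ k0 := by omega
      set next := List.zipWith max prev (prev.drop (2 ^ k0)) with hnext
      have hnlen : next.length = l.length + 1 - 2 ^ (k0 + 1) := by
        rw [hnext, List.length_zipWith, List.length_drop]
        omega
      have hnpred : ∀ s : Nat, s + 2 ^ (k0 + 1) ≤ l.length →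
          pvPred l (next.getD s 0) s (2 ^ (k0 + 1)) := by
        intro s hs
        have hslt : s < next.length := by omega
        have hs1 : s < prev.length := by omega
        have hs2 : s + 2 ^ k0 < prev.length := by omega
        have hgd : next.getD s 0 = max prev[s] prev[s + 2 ^ k0] := by
          rw [List.getD_eq_getElem next 0 hslt]
          simp only [hnext, List.getElem_zipWith, List.getElem_drop, Nat.add_comm]
        rw [hgd, ← hsz]
        have h1 := hpred s (by omega)
        have h2 := hpred (s + 2 ^ k0) (by omega)
        rw [List.getD_eq_getElem prev 0 hs1] at h1
        rw [List.getD_eq_getElem prev 0 hs2] at h2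
        exact pvPred_max l _ _ s (2 ^ k0) h1 h2
      have hfuel' : l.length < 2 ^ (k0 + 1) * 2 ^ fuel := by
        calc l.length < 2 ^ k0 * 2 ^ (fuel + 1) := hfuel
        _ = 2 ^ (k0 + 1) * 2 ^ fuel := by ring
      obtain ⟨c1, c2⟩ := ih (k0 + 1) next hfuel' (by omega) hnpred
      simp only [pvBuildLevels, if_pos (by omega : 2 * 2 ^ k0 ≤ l.length)]
      rw [hsz, ← hnext]
      refine ⟨?_, ?_⟩
      · simp only [List.length_cons]
        have heq : k0 + ((pvBuildLevels l.length fuel (2 ^ (k0 + 1)) next).length + 1)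
            = (k0 + 1) + (pvBuildLevels l.length fuel (2 ^ (k0 + 1)) next).length := by omega
        rw [heq]; exact c1
      · intro d hd s hs
        cases d with
        | zero => simpa using hpred s (by simpa using hs)
        | succ d =>
          have heq : k0 + (d + 1) = (k0 + 1) + d := by omega
          rw [heq] at hs ⊢
          have hd' : d < (pvBuildLevels l.length fuel (2 ^ (k0 + 1)) next).length := by
            simp only [List.length_cons] at hd; omega
          simpa using c2 d hd' s hs
    · simp only [pvBuildLevels, if_neg hc]
      refine ⟨?_, ?_⟩
      · have : (2:Nat) ^ (k0 + 1) = 2 * 2 ^ k0 := by rw [pow_succ]; ring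
        simpa [this] using (by omega : l.length < 2 * 2 ^ k0)
      · intro d hd s hs
        have hd0 : d = 0 := by simpa using hd
        subst hd0
        simpa using hpred s (by simpa using hs)

-- ----- the countdown fold is pvRecD -----
lemma pvFoldl_countdown (G : Int → Int → Int) : ∀ (c : Nat) (j : Int),
    (PySem.List.pyRange ((c : Int) - 1) (-1) (-1)).foldl G j =
      pvRecD (fun j k => G j (k : Int)) c j := by
  intro c
  induction c with
  | zero =>
    intro j
    rw [PySem.List.pyRange_neg_one_eq_nil (by omega)]
    rfl
  | succ c ih =>
    intro j
    have : ((c + 1 : Nat) : Int) - 1 = (c : Int) := by push_cast; ring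
    rw [this, PySem.List.pyRange_neg_one_cons (by omega)]
    simp only [List.foldl_cons]
    rw [ih]
    rfl

-- ----- the descent finds i + greedy-run-length -----
lemma pvDesc_correct (l : List Int) (money : Int) (i : Nat) (hi : i ≤ l.length)
    (levels : List (List Int))
    (hlev : ∀ d : Nat, d < levels.length → ∀ s : Nat, s + 2 ^ d ≤ l.length →
      pvPred l ((levels.getD d []).getD s 0) s (2 ^ d)) :
    ∀ (k : Nat) (j : Nat), k ≤ levels.length → i ≤ j → j ≤ i + pvGlen money (l.drop i) →
      i + pvGlen money (l.drop i) < j + 2 ^ k →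
      pvRecD (fun j k =>
        if j + (1 : Int) <<< (((k : Int)).toNat : Int) ≤ (l.length : Int) ∧
           PySem.List.pyGetD (PySem.List.pyGetD levels (k : Int) []) j 0 ≤ money + pvPS l i then
          j + (1 : Int) <<< (((k : Int)).toNat : Int)
        else j) k (j : Int) = ((i + pvGlen money (l.drop i) : Nat) : Int) := by
  set m := pvGlen money (l.drop i) with hm
  set bound := money + pvPS l i with hbound
  have hmle : i + m ≤ l.length := by
    have := pvGlen_le_length money (l.drop i)
    rw [← hm] at this
    simp [List.length_drop] at this
    omega
  have allP : ∀ t : Nat, i < t → t ≤ i + m → pvPS l t ≤ bound := by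
    intro t ht1 ht2
    have h := pvGlen_prefix_le money (l.drop i) (t - i) (by omega) (by omega)
    have h2 := pvPS_drop l i (t - i)
    rw [hbound]
    simp only [pvPS] at h h2 ⊢
    rw [show i + (t - i) = t by omega] at h2
    omega
  have stopP : i + m < l.length → bound < pvPS l (i + m + 1) := by
    intro hlt
    have h := pvGlen_stop money (l.drop i) (by simp [List.length_drop]; omega)
    have h2 := pvPS_drop l i (m + 1)
    rw [← hm] at h
    rw [hbound]
    simp only [pvPS] at h h2 ⊢
    rw [show i + (m + 1) = i + m + 1 by omega] at h2
    omega
  intro k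
  induction k with
  | zero =>
    intro j hk hij hjm hlt
    simp only [pvRecD]
    have : j = i + m := by omega
    rw [this]
  | succ k ih =>
    intro j hk hij hjm hlt
    simp only [pvRecD]
    have hstep : (1 : Int) <<< ((((k : Int)).toNat : Nat) : Int) = ((2 ^ k : Nat) : Int) := by
      simp [Int.shiftLeft_natCast_right, Int.shiftLeft_eq]
    have hv : PySem.List.pyGetD (PySem.List.pyGetD levels ((k : Nat) : Int) []) ((j : Nat) : Int) 0
        = (levels.getD k []).getD j 0 := by
      simp
    by_cases hg : (j : Int) + ((2 ^ k : Nat) : Int) ≤ (l.length : Int) ∧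
        (levels.getD k []).getD j 0 ≤ bound
    · have hjn : j + 2 ^ k ≤ l.length := by exact_mod_cast hg.1
      have hpred := hlev k (by omega) j (by omega)
      have hall := (hpred bound).1 hg.2
      have hnew : j + 2 ^ k ≤ i + m := by
        by_contra hcon
        have ht : i + m + 1 ≤ j + 2 ^ k := by omega
        have h1 := hall (i + m + 1) (by omega) (by omega)
        have h2 := stopP (by omega)
        omega
      rw [if_pos (by rw [hstep, hv]; exact hg)]
      rw [hstep, show (j : Int) + ((2 ^ k : Nat) : Int) = ((j + 2 ^ k : Nat) : Int) by push_cast; ring]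
      exact ih (j + 2 ^ k) (by omega) (by omega) hnew (by
        have : (2:Nat) ^ (k + 1) = 2 ^ k + 2 ^ k := by rw [pow_succ]; ring
        omega)
    · have hnew : i + m < j + 2 ^ k := by
        by_cases hn : (j : Int) + ((2 ^ k : Nat) : Int) ≤ (l.length : Int)
        · have hjn : j + 2 ^ k ≤ l.length := by exact_mod_cast hn
          have hvb : ¬ (levels.getD k []).getD j 0 ≤ bound := fun hvle => hg ⟨hn, hvle⟩
          by_contra hcon
          have hpred := hlev k (by omega) j (by omega)
          exact hvb ((hpred bound).2 (fun t ht1 ht2 => allP t (by omega) (by omega)))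
        · have : (l.length : Int) < (j : Int) + ((2 ^ k : Nat) : Int) := by omega
          have : l.length < j + 2 ^ k := by exact_mod_cast this
          omega
      rw [if_neg (by rw [hstep, hv]; exact hg)]
      exact ih j (by omega) hij hjm hnew

-- per-start equality of the two loop bodies, and the final theorem, below
lemma pvMain (l : List Int) (money : Int) :
    getMaximumOutfits l money = getMaximumOutfits_alt l money := by
  have hlev0 : ∀ s : Nat, s + 2 ^ 0 ≤ l.length →
      pvPred l ((pvSums 0 l).getD s 0) s (2 ^ 0) := by
    intro s hs
    rw [pvSums_getD l 0 s (by simpa using hs)]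
    intro c
    constructor
    · intro h t ht1 ht2
      have : t = s + 1 := by simp at ht2; omega
      rw [this]
      simpa using h
    · intro h
      simpa using h (s + 1) (by omega) (by simp)
  obtain ⟨hLtop, hlev⟩ := pvBuild_ok l (l.length + 1) 0 (pvSums 0 l)
    (by
      have h1 : l.length < 2 ^ l.length := Nat.lt_two_pow_self
      have h2 : (2:Nat) ^ l.length ≤ 2 ^ (l.length + 1) := Nat.pow_le_pow_right (by omega) (by omega)
      simpa using lt_of_lt_of_le h1 h2)
    (by simp [pvSums_length])
    hlev0
  simp only [pow_zero, Nat.zero_add] at hLtop hlev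
  simp only [getMaximumOutfits, getMaximumOutfits_alt, PySem.List.len_eq, pvP_eq,
    PySem.List.slice_from_one, List.tail_cons]
  apply PySem.List.foldl_congr_mem
  intro best iv hmem
  rw [PySem.List.mem_pyRange_one] at hmem
  have hiv : ((iv.toNat : Nat) : Int) = iv := Int.toNat_of_nonneg hmem.1
  have hilt : iv.toNat < l.length := by omega
  rw [← hiv]
  rw [pvWhileA_eq l (l.length + 1) iv.toNat money (by omega) (by omega)]
  rw [PySem.List.pyGetD_natCast, pvP_getD l iv.toNat (by omega)]
  rw [pvFoldl_countdown]
  have hmlen : pvGlen money (l.drop iv.toNat) ≤ l.length - iv.toNat := by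
    have := pvGlen_le_length money (l.drop iv.toNat)
    simpa [List.length_drop] using this
  rw [pvDesc_correct l money iv.toNat (by omega)
      (pvBuildLevels l.length (l.length + 1) 1 (pvSums 0 l)) hlev
      (pvBuildLevels l.length (l.length + 1) 1 (pvSums 0 l)).length iv.toNat
      le_rfl le_rfl (by omega) (by omega)]
  have : ((iv.toNat : Nat) : Int) + ((pvGlen money (l.drop iv.toNat) : Nat) : Int)
      = ((iv.toNat + pvGlen money (l.drop iv.toNat) : Nat) : Int) := by push_cast; ring
  rw [this]

-- ===== VERDICT (by name: the statement is the Claim_ definition above) =====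
theorem getMaximumOutfits_spec : Claim_equal_getMaximumOutfits := by
  intro outfits money _
  show getMaximumOutfits outfits money = getMaximumOutfits_alt outfits money
  exact pvMain outfits money
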